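-- pv_equiv track=rewrite | github.com/senxiangms/leetcode | 1998. GCD Sort of an Array.py | gcdSort
-- ===== SOURCE A (Python) =====
-- from typing import List
--
-- class UnionFind:
--     def __init__(self):
--         self.parent = {}
--
--     def find(self, u):
--         if u != self.parent.setdefault(u, u):
--             self.parent[u] = self.find(self.parent[u])  # Path compression
--         return self.parent[u]
--
--     def union(self, u, v):
--         pu, pv = self.find(u), self.find(v)
--         if pu != pv: self.parent[pu] = pv
--
-- def gcdSort(nums: List[int]) -> bool:
--     def sieve(n):  # O(N*log(logN)) ~ O(N)
--         spf = [i for i in range(n)]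
--         for i in range(2, n):
--             if spf[i] != i: continue  # Skip if it's a not prime number
--             for j in range(i * i, n, i):
--                 if spf[j] > i:  # update to the smallest prime factor of j
--                     spf[j] = i
--         return spf
--
--     def getPrimeFactors(num, spf):  # O(logNum)
--         while num > 1:
--             yield spf[num]
--             num //= spf[num]
--
--     spf = sieve(max(nums) + 1)
--     uf = UnionFind()
--     for x in nums:
--         for f in getPrimeFactors(x, spf):
--             uf.union(x, f)
--
--     for x, y in zip(nums, sorted(nums)):
--         if uf.find(x) != uf.find(y):
--             return False
--
--     return True
-- ===== SOURCE B (Python) =====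
-- from typing import List
--
-- class UnionFind:
--     def __init__(self):
--         self.parent = {}
--
--     def find(self, u):
--         if u != self.parent.setdefault(u, u):
--             self.parent[u] = self.find(self.parent[u])  # Path compression
--         return self.parent[u]
--
--     def union(self, u, v):
--         pu, pv = self.find(u), self.find(v)
--         if pu != pv: self.parent[pu] = pv
--
-- def gcdSort(nums: List[int]) -> bool:
--     # Per-number trial division instead of A's sieve + smallest-prime-factor table.
--     def primeFactors(x):  # factors in nondecreasing order, with multiplicity
--         fs = []
--         d = 2
--         while d * d <= x:
--             if x % d == 0:
--                 fs.append(d)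
--                 x //= d
--             else:
--                 d += 1
--         if x > 1:
--             fs.append(x)
--         return fs
--
--     uf = UnionFind()
--     for x in nums:
--         for f in primeFactors(x):
--             uf.union(x, f)
--
--     return all(uf.find(x) == uf.find(y) for x, y in zip(nums, sorted(nums)))
-- ===== Notes on version B (the rewrite author's own statement) =====
-- stated objective: alternative
-- what changed: Replaced the sieve+smallest-prime-factor-table factorization by per-number trial division up to sqrt(x); the UnionFind and the sorted-pair comparison are unchanged, and the union groups are identical because both factorizations emit the same factor sequence.
-- outside the precondition, e.g. on gcdSort([]): A raises ValueError, B returns True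
import Mathlib
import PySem

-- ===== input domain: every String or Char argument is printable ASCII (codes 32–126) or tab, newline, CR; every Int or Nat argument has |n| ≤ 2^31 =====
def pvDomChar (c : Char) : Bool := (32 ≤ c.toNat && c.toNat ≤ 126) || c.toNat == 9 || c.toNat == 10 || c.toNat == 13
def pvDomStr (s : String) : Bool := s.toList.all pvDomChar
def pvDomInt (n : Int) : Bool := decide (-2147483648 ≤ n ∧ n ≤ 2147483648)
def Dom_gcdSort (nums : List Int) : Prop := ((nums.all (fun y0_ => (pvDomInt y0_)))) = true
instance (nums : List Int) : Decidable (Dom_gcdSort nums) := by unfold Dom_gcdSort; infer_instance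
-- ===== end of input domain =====

-- B factors each number by trial division instead of A's sieve + smallest-prime-factor
-- table; the UnionFind and the sorted-pair comparison are unchanged.

-- ===== PORT A =====
-- UnionFind helpers: the UnionFind class is textually identical in Source A and Source B, so
-- both ports share these transliterations.
-- find(u) with path compression; the fuel argument only makes the Python recursion
-- structural — callers pass (size + 1), which exceeds the parent-chain length on every
-- dict the two programs ever build (parent chains are acyclic and visit distinct keys).
def ufFind (fuel : Nat) (parent : PySem.Dict Int Int) (u : Int) : PySem.Dict Int Int × Int :=
  match fuel with
  | 0 => (parent, u)  -- unreachable fuel guard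
  | fuel + 1 =>
    let parent := parent.setdefault u u
    let p := parent.getD u u
    if u ≠ p then
      let r := ufFind fuel parent p
      (PySem.Dict.insert r.1 u r.2, r.2)  -- self.parent[u] = self.find(self.parent[u]); return self.parent[u]
    else (parent, u)

def ufUnion (parent : PySem.Dict Int Int) (u v : Int) : PySem.Dict Int Int :=
  let fu := ufFind (parent.size + 1) parent u
  let fv := ufFind (fu.1.size + 1) fu.1 v
  if fu.2 ≠ fv.2 then PySem.Dict.insert fv.1 fu.2 fv.2 else fv.1

-- the final loop over zip(nums, sorted(nums)) with early return False; identical in both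
-- Pythons (A's explicit loop; B's short-circuiting all(...)), so shared too.
def checkPairs : PySem.Dict Int Int → List (Int × Int) → Bool
  | _, [] => true
  | uf, p :: rest =>
    let fx := ufFind (uf.size + 1) uf p.1
    let fy := ufFind (fx.1.size + 1) fx.1 p.2
    if fx.2 ≠ fy.2 then false else checkPairs fy.1 rest

-- inner sieve loop: for j in range(i*i, n, i): if spf[j] > i: spf[j] = i
-- (indices j are always in range 0 ≤ j < n = len(spf), so pyGetD/pySetD are exact)
def sieveInner (spf : List Int) (i n : Int) : List Int :=
  (PySem.List.pyRange (i * i) n i).foldl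
    (fun spf j => if i < PySem.List.pyGetD spf j 0 then PySem.List.pySetD spf j i else spf)
    spf

-- spf = [i for i in range(n)]; for i in range(2, n): if spf[i] != i: continue; inner loop
def sieve (n : Int) : List Int :=
  (PySem.List.pyRange 2 n 1).foldl
    (fun spf i => if PySem.List.pyGetD spf i 0 ≠ i then spf else sieveInner spf i n)
    (PySem.List.pyRange 0 n 1)

-- getPrimeFactors(num, spf): while num > 1: yield spf[num]; num //= spf[num]
-- fuel (num.toNat + 1) only makes the while loop structural: num strictly decreases,
-- since spf[num] ≥ 2 on every state A builds; index num is always in range (exact pyGetD).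
def gpf (spf : List Int) : Nat → Int → List Int
  | 0, _ => []  -- unreachable fuel guard
  | fuel + 1, num =>
    if 1 < num then
      PySem.List.pyGetD spf num 0 ::
        gpf spf fuel (PySem.Int.floordiv num (PySem.List.pyGetD spf num 0))
    else []

def gcdSort (nums : List Int) : Bool :=
  match PySem.List.max? nums (fun y => y) with
  | none => false  -- max([]) raises ValueError; excluded by Pre_gcdSort
  | some mx =>
    let spf := sieve (mx + 1)
    let uf := nums.foldl
      (fun uf x => (gpf spf (x.toNat + 1) x).foldl (fun uf f => ufUnion uf x f) uf)
      (PySem.Dict.mk [])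
    checkPairs uf (nums.zip (PySem.List.sorted nums (fun y => y) false))

-- ===== PORT B =====
-- while d * d <= x: if x % d == 0: append d; x //= d else: d += 1; then if x > 1: append x
-- fuel (2*x.toNat + 2) only makes the while loop structural (each iteration either halves
-- x or increments d ≤ x, so it exceeds the iteration count).
def trialDivide (fuel : Nat) (d x : Int) : List Int :=
  if d * d ≤ x then
    match fuel with
    | 0 => []  -- unreachable fuel guard
    | fuel + 1 =>
      if PySem.Int.mod x d = 0 then d :: trialDivide fuel d (PySem.Int.floordiv x d)
      else trialDivide fuel (d + 1) x
  else if 1 < x then [x] else []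
termination_by fuel

def primeFactorsB (x : Int) : List Int := trialDivide (2 * x.toNat + 2) 2 x

def gcdSort_alt (nums : List Int) : Bool :=
  let uf := nums.foldl
    (fun uf x => (primeFactorsB x).foldl (fun uf f => ufUnion uf x f) uf)
    (PySem.Dict.mk [])
  checkPairs uf (nums.zip (PySem.List.sorted nums (fun y => y) false))

-- ===== PRECONDITION & SPEC =====
-- Pre_ excludes only the empty list, on which A raises ValueError (max([])).
def Pre_gcdSort (nums : List Int) : Prop := nums ≠ []
instance (nums : List Int) : Decidable (Pre_gcdSort nums) := by unfold Pre_gcdSort; infer_instance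
def pvWitness_gcdSort : List Int := [10, 5, 9, 3, 15]

def Spec_gcdSort (nums : List Int) (out : Bool) : Prop := out = gcdSort_alt nums
instance (nums : List Int) (out : Bool) : Decidable (Spec_gcdSort nums out) := by unfold Spec_gcdSort; infer_instance

-- ===== CLAIM (what is proved, stated in full; the proofs are below) =====
def Claim_equal_gcdSort : Prop := ∀ (nums : List Int), Dom_gcdSort nums → Pre_gcdSort nums → Spec_gcdSort nums (gcdSort nums)

-- ===== LEMMAS AND PROOFS =====

def mapInt (l : List Nat) : List Int := l.map (fun k => (k : Int))

theorem mapInt_nil : mapInt [] = [] := rfl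
theorem mapInt_cons (a : Nat) (l : List Nat) : mapInt (a :: l) = (a : Int) :: mapInt l := rfl

theorem pfl_two {n : ℕ} (h : 2 ≤ n) :
    n.primeFactorsList = n.minFac :: (n / n.minFac).primeFactorsList := by
  obtain ⟨k, rfl⟩ : ∃ k, n = k + 2 := ⟨n - 2, by omega⟩
  rw [Nat.primeFactorsList]

theorem minFac_eq_of_first_dvd (d x : Int) (hd : 2 ≤ d) (hx : 1 ≤ x)
    (hdvd : d ∣ x) (hmin : ∀ e : Int, 2 ≤ e → e < d → ¬ e ∣ x) :
    (x.toNat.minFac : Int) = d := by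
  set k := x.toNat with hk
  set D := d.toNat with hD
  have hxk : x = (k : Int) := by omega
  have hdD : d = (D : Int) := by omega
  have hDk : D ∣ k := by
    rw [hxk, hdD] at hdvd; exact_mod_cast hdvd
  have hk2 : 2 ≤ k := le_trans (by omega) (Nat.le_of_dvd (by omega) hDk)
  have hle : k.minFac ≤ D := Nat.minFac_le_of_dvd (by omega) hDk
  have h2 : 2 ≤ k.minFac := (Nat.minFac_prime (by omega)).two_le
  have hge : ¬ (k.minFac < D) := by
    intro hlt
    exact hmin (k.minFac : Int) (by exact_mod_cast h2) (by omega)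
      (by rw [hxk]; exact_mod_cast Nat.minFac_dvd k)
  omega

theorem trialDivide_terminal (d x : Int) (hd : 2 ≤ d) (hx : 1 ≤ x)
    (hmin : ∀ e : Int, 2 ≤ e → e < d → ¬ e ∣ x) (hgt : x < d * d) :
    (if 1 < x then [x] else ([] : List Int))
      = mapInt (Nat.primeFactorsList x.toNat) := by
  by_cases h1 : 1 < x
  · rw [if_pos h1]
    set k := x.toNat with hk
    have hk2 : 2 ≤ k := by omega
    have hxk : x = (k : Int) := by omega
    have h2 : 2 ≤ k.minFac := (Nat.minFac_prime (by omega)).two_le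
    have hge : ¬ ((k.minFac : Int) < d) := by
      intro hlt
      exact hmin (k.minFac : Int) (by exact_mod_cast h2) hlt
        (by rw [hxk]; exact_mod_cast Nat.minFac_dvd k)
    have hprime : Nat.Prime k := by
      by_contra hnp
      have hsq := Nat.minFac_sq_le_self (by omega) hnp
      have : (k.minFac : Int) * (k.minFac : Int) ≤ (k : Int) := by
        rw [pow_two] at hsq; exact_mod_cast hsq
      nlinarith
    rw [Nat.primeFactorsList_prime hprime, mapInt_cons, mapInt_nil]
    rw [hxk]
  · rw [if_neg h1]
    have : x.toNat = 1 := by omega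
    rw [this, Nat.primeFactorsList_one, mapInt_nil]

theorem trialDivide_eq (fuel : Nat) (d x : Int) (hd : 2 ≤ d) (hx : 1 ≤ x)
    (hmin : ∀ e : Int, 2 ≤ e → e < d → ¬ e ∣ x)
    (hfuel : 2 * x.toNat + 2 < fuel + d.toNat) :
    trialDivide fuel d x = mapInt (Nat.primeFactorsList x.toNat) := by
  induction fuel generalizing d x with
  | zero =>
    rw [trialDivide]
    have hgt : ¬ (d * d ≤ x) := by
      intro hle
      have hdx : d ≤ x := le_trans (by nlinarith) hle
      omega
    rw [if_neg hgt]
    exact trialDivide_terminal d x hd hx hmin (by omega)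
  | succ fuel ih =>
    rw [trialDivide]
    by_cases hdd : d * d ≤ x
    · rw [if_pos hdd]
      have hdx : d ≤ x := le_trans (by nlinarith) hdd
      by_cases hmod : PySem.Int.mod x d = 0
      · rw [if_pos hmod]
        have hdvd : d ∣ x := by
          rw [PySem.Int.mod, Int.fmod_eq_emod] at hmod
          simp only [if_pos (Or.inl (by omega : (0:Int) ≤ d)), add_zero] at hmod
          exact (PySem.Int.emod_eq_zero_iff_dvd x d).mp hmod
        set k := x.toNat with hk
        set D := d.toNat with hD
        have hxk : x = (k : Int) := by omega
        have hdD : d = (D : Int) := by omega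
        have hminFac : (k.minFac : Int) = d := minFac_eq_of_first_dvd d x hd hx hdvd hmin
        have hk2 : 2 ≤ k := by omega
        have hfd : PySem.Int.floordiv x d = ((k / D : Nat) : Int) := by
          rw [PySem.Int.floordiv, Int.fdiv_eq_ediv,
            if_pos (Or.inl (by omega : (0:Int) ≤ d)), sub_zero, hxk, hdD]
          exact_mod_cast rfl
        have hDdvd : D ∣ k := by rw [hxk, hdD] at hdvd; exact_mod_cast hdvd
        have hquot1 : 1 ≤ k / D := (Nat.one_le_div_iff (by omega)).mpr (Nat.le_of_dvd (by omega) hDdvd)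
        have hhalf : k / D ≤ k / 2 := Nat.div_le_div_left (by omega) (by omega)
        have hhalf2 : 2 * (k / 2) ≤ k := by omega
        rw [hfd]
        rw [ih d ((k / D : Nat) : Int) hd (by exact_mod_cast hquot1)
          (fun e he hed hedvd => hmin e he hed (hedvd.trans (by
            exact ⟨d, by rw [hxk, hdD]; exact_mod_cast (Nat.div_mul_cancel hDdvd).symm⟩)))
          (by simp only [Int.toNat_natCast]; omega)]
        have hMD : k.minFac = D := by omega
        simp only [Int.toNat_natCast]
        rw [pfl_two hk2, mapInt_cons, hMD, ← hdD]
      · rw [if_neg hmod]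
        have hndvd : ¬ d ∣ x := by
          intro hdvd
          apply hmod
          rw [PySem.Int.mod, Int.fmod_eq_emod,
            if_pos (Or.inl (by omega : (0:Int) ≤ d)), add_zero]
          exact (PySem.Int.emod_eq_zero_iff_dvd x d).mpr hdvd
        exact ih (d + 1) x (by omega) hx
          (fun e he hed hedvd => by
            rcases lt_or_eq_of_le (by omega : e ≤ d) with h | h
            · exact hmin e he h hedvd
            · exact hndvd (h ▸ hedvd))
          (by omega)
    · rw [if_neg hdd]
      exact trialDivide_terminal d x hd hx hmin (by omega)


theorem length_foldl_update (i : Int) (js : List Int) (spf : List Int) :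
    (js.foldl (fun s j => if i < PySem.List.pyGetD s j 0 then PySem.List.pySetD s j i else s) spf).length
      = spf.length := by
  induction js generalizing spf with
  | nil => rfl
  | cons j js ih =>
    simp only [List.foldl_cons]
    rw [ih]
    split
    · exact PySem.List.length_pySetD _ _ _
    · rfl

theorem foldl_update_getD (i : Int) (js : List Int) (spf : List Int)
    (hjs : ∀ j ∈ js, 0 ≤ j ∧ j.toNat < spf.length) (m : Nat) (hm : m < spf.length) :
    PySem.List.pyGetD
      (js.foldl (fun s j => if i < PySem.List.pyGetD s j 0 then PySem.List.pySetD s j i else s) spf)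
      (m : Int) 0
    = if (m : Int) ∈ js ∧ i < PySem.List.pyGetD spf (m : Int) 0 then i
      else PySem.List.pyGetD spf (m : Int) 0 := by
  induction js generalizing spf with
  | nil => simp
  | cons j js ih =>
    obtain ⟨hj0, hjlen⟩ := hjs j (List.mem_cons_self)
    have hjcast : j = ((j.toNat : Nat) : Int) := by omega
    simp only [List.foldl_cons]
    set spf' := if i < PySem.List.pyGetD spf j 0 then PySem.List.pySetD spf j i else spf with hspf'
    have hlen' : spf'.length = spf.length := by
      rw [hspf']; split
      · exact PySem.List.length_pySetD _ _ _
      · rfl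
    have hget' : PySem.List.pyGetD spf' (m : Int) 0
        = if (m : Int) = j ∧ i < PySem.List.pyGetD spf j 0 then i
          else PySem.List.pyGetD spf (m : Int) 0 := by
      rw [hspf']
      by_cases hgt : i < PySem.List.pyGetD spf j 0
      · rw [if_pos hgt, hjcast, PySem.List.pyGetD_pySetD_natCast _ _ _ _ _ hjlen]
        by_cases hmj : m = j.toNat
        · rw [if_pos hmj, if_pos ⟨by omega, by rwa [← hjcast]⟩]
        · rw [if_neg hmj, if_neg (by rintro ⟨h1, -⟩; omega)]
      · rw [if_neg hgt, if_neg (by rintro ⟨-, h2⟩; exact hgt h2)]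
    rw [ih spf' (fun j' hj' => by
        obtain ⟨a, b⟩ := hjs j' (List.mem_cons_of_mem _ hj'); exact ⟨a, by omega⟩)
      (by omega), hget']
    by_cases hmj : (m : Int) = j
    · subst hmj
      by_cases hgt : i < PySem.List.pyGetD spf (m : Int) 0
      · simp only [PySem.List.pyGetD_natCast, List.getD_eq_getElem?_getD] at hgt ⊢
        simp [hgt, List.mem_cons]
      · simp only [PySem.List.pyGetD_natCast, List.getD_eq_getElem?_getD] at hgt ⊢
        simp [hgt, List.mem_cons]
    · by_cases hmem : (m : Int) ∈ js
      · simp [hmj, hmem, List.mem_cons]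
      · simp [hmj, hmem, List.mem_cons]

def specAt (k : Int) (m : Nat) : Int :=
  if 2 ≤ m ∧ (m.minFac : Int) ≤ k ∧ m.minFac * m.minFac ≤ m then (m.minFac : Int) else (m : Int)

def GoodSpf (n k : Int) (spf : List Int) : Prop :=
  spf.length = n.toNat ∧
    ∀ m : Nat, m < n.toNat → PySem.List.pyGetD spf (m : Int) 0 = specAt k m

theorem step_good (n a : Int) (ha : 2 ≤ a) (han : a < n) (spf : List Int)
    (h : GoodSpf n (a - 1) spf) :
    GoodSpf n a (if PySem.List.pyGetD spf a 0 ≠ a then spf else sieveInner spf a n) := by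
  obtain ⟨hlen, hval⟩ := h
  set A := a.toNat with hA
  have haA : a = (A : Int) := by omega
  have hA2 : 2 ≤ A := by omega
  have hAn : A < n.toNat := by omega
  have hspfa : PySem.List.pyGetD spf a 0 = specAt (a - 1) A := by
    have := hval A hAn; rwa [← haA] at this
  by_cases hp : A.Prime
  · -- prime: spf[a] = a, guard false, run the inner loop
    have hmfA : A.minFac = A := (Nat.prime_def_minFac.mp hp).2
    have hspec : specAt (a - 1) A = a := by
      unfold specAt
      rw [if_neg (by rintro ⟨-, hle, -⟩; rw [hmfA] at hle; omega)]
      omega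
    rw [if_neg (by rw [hspfa, hspec]; exact fun h => h rfl)]
    constructor
    · rw [sieveInner, length_foldl_update, hlen]
    · intro m hmn
      have hmem_iff : ((m : Int) ∈ PySem.List.pyRange (a * a) n a)
          ↔ (a * a ≤ (m : Int) ∧ a ∣ (m : Int)) := by
        rw [PySem.List.mem_pyRange_iff_of_pos (by omega)]
        constructor
        · rintro ⟨h1, -, h3⟩
          refine ⟨h1, ?_⟩
          have := dvd_add h3 (dvd_mul_left a a)
          simpa using this
        · rintro ⟨h1, h2⟩
          exact ⟨h1, by omega, dvd_sub h2 (dvd_mul_left a a)⟩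
      rw [sieveInner, foldl_update_getD a _ spf
        (fun j hj => by
          rw [PySem.List.mem_pyRange_iff_of_pos (by omega)] at hj
          constructor
          · nlinarith [hj.1]
          · omega)
        m (by omega)]
      rw [hval m hmn]
      set p := m.minFac with hpdef
      by_cases hm2 : 2 ≤ m
      · have hpm : p ∣ m := Nat.minFac_dvd m
        have hp2 : 2 ≤ p := (Nat.minFac_prime (by omega)).two_le
        have hple : p ≤ m := Nat.minFac_le (by omega)
        by_cases hpa : (p : Int) ≤ a - 1
        · by_cases hpp : p * p ≤ m
          · -- already set to p earlier; a < p is false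
            have hold : specAt (a - 1) m = (p : Int) := by
              unfold specAt; rw [if_pos ⟨hm2, hpa, hpp⟩]
            rw [hold]
            unfold specAt
            rw [if_neg (by omega), if_pos ⟨hm2, by omega, hpp⟩]
          · -- spf[m] = m; m not in the range (else p*p ≤ A*A ≤ m)
            have hold : specAt (a - 1) m = (m : Int) := by
              unfold specAt; rw [if_neg (by rintro ⟨-, -, h3⟩; exact hpp h3)]
            rw [hold]
            have hnm : ¬ ((m : Int) ∈ PySem.List.pyRange (a * a) n a) := by
              rw [hmem_iff]
              rintro ⟨h1, h2⟩
              have hAm : A ∣ m := by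
                rw [haA] at h2; exact_mod_cast h2
              have : p ≤ A := Nat.minFac_le_of_dvd hA2 hAm
              have : (A : Int) * A ≤ m := by rw [haA] at h1; exact_mod_cast h1
              nlinarith
            rw [if_neg (by rintro ⟨h1, -⟩; exact hnm h1)]
            unfold specAt
            rw [if_neg (by rintro ⟨-, -, h3⟩; exact hpp h3)]
        · -- p ≥ a
          have hold : specAt (a - 1) m = (m : Int) := by
            unfold specAt; rw [if_neg (by rintro ⟨-, h2, -⟩; exact hpa h2)]
          rw [hold]
          by_cases hpeq : p = A
          · by_cases hAA : A * A ≤ m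
            · -- newly discovered multiple of the prime a
              have hmem : (m : Int) ∈ PySem.List.pyRange (a * a) n a := by
                rw [hmem_iff]
                constructor
                · rw [haA]; exact_mod_cast hAA
                · rw [haA]; exact_mod_cast (hpeq ▸ hpm)
              have hlt : a < (m : Int) := by
                have : 2 * A ≤ A * A := by nlinarith
                omega
              rw [if_pos ⟨hmem, hlt⟩]
              unfold specAt
              rw [if_pos ⟨hm2, by omega, by rw [← hpdef, hpeq]; exact hAA⟩, ← hpdef, hpeq, haA]
            · -- m = a itself (or at least a² > m): value stays m
              have hnm : ¬ ((m : Int) ∈ PySem.List.pyRange (a * a) n a) := by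
                rw [hmem_iff]
                rintro ⟨h1, -⟩
                rw [haA] at h1
                exact hAA (by exact_mod_cast h1)
              rw [if_neg (by rintro ⟨h1, -⟩; exact hnm h1)]
              unfold specAt
              rw [if_neg (by
                rintro ⟨-, -, h3⟩
                rw [← hpdef, hpeq] at h3
                exact hAA h3)]
          · -- p > A: a does not divide m, nothing changes
            have hpA : A < p := by omega
            have hnm : ¬ ((m : Int) ∈ PySem.List.pyRange (a * a) n a) := by
              rw [hmem_iff]
              rintro ⟨-, h2⟩
              have hAm : A ∣ m := by rw [haA] at h2; exact_mod_cast h2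
              have := Nat.minFac_le_of_dvd hA2 hAm
              omega
            rw [if_neg (by rintro ⟨h1, -⟩; exact hnm h1)]
            unfold specAt
            rw [if_neg (by rintro ⟨-, h2, -⟩; rw [← hpdef] at h2; omega)]
      · -- m < 2: never touched
        have hold : specAt (a - 1) m = (m : Int) := by
          unfold specAt; rw [if_neg (by rintro ⟨h1, -, -⟩; exact hm2 h1)]
        rw [hold]
        have hnm : ¬ ((m : Int) ∈ PySem.List.pyRange (a * a) n a) := by
          rw [hmem_iff]
          rintro ⟨h1, -⟩
          nlinarith
        rw [if_neg (by rintro ⟨h1, -⟩; exact hnm h1)]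
        unfold specAt
        rw [if_neg (by rintro ⟨h1, -, -⟩; exact hm2 h1)]
  · -- composite: spf[a] = minFac A < a, guard true, skip
    have hmf : A.minFac ∣ A := Nat.minFac_dvd A
    have hmf2 : 2 ≤ A.minFac := (Nat.minFac_prime (by omega)).two_le
    have hmfle : A.minFac ≤ A := Nat.minFac_le (by omega)
    have hmfne : A.minFac ≠ A := by
      intro heq
      exact hp (Nat.prime_def_minFac.mpr ⟨hA2, heq⟩)
    have hmfsq : A.minFac * A.minFac ≤ A := by
      have := Nat.minFac_sq_le_self (n := A) (by omega) hp
      rwa [pow_two] at this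
    have hspec : specAt (a - 1) A = (A.minFac : Int) := by
      unfold specAt; rw [if_pos ⟨hA2, by omega, hmfsq⟩]
    rw [if_pos (by rw [hspfa, hspec]; omega)]
    refine ⟨hlen, fun m hmn => ?_⟩
    rw [hval m hmn]
    unfold specAt
    by_cases hm2 : 2 ≤ m
    · have hne : m.minFac ≠ A := by
        intro heq
        exact hp (heq ▸ Nat.minFac_prime (by omega))
      by_cases hc : (m.minFac : Int) ≤ a - 1 ∧ m.minFac * m.minFac ≤ m
      · rw [if_pos ⟨hm2, hc.1, hc.2⟩, if_pos ⟨hm2, by omega, hc.2⟩]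
      · rw [if_neg (by rintro ⟨-, h2, h3⟩; exact hc ⟨h2, h3⟩),
          if_neg (by rintro ⟨-, h2, h3⟩; exact hc ⟨by omega, h3⟩)]
    · rw [if_neg (by rintro ⟨h1, -⟩; exact hm2 h1), if_neg (by rintro ⟨h1, -⟩; exact hm2 h1)]

theorem outer_good (n : Int) (k : Nat) : ∀ (a : Int) (spf : List Int), 2 ≤ a → a ≤ n →
    (n - a).toNat = k → GoodSpf n (a - 1) spf →
    GoodSpf n (n - 1)
      ((PySem.List.pyRange a n 1).foldl
        (fun spf i => if PySem.List.pyGetD spf i 0 ≠ i then spf else sieveInner spf i n) spf) := by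
  induction k with
  | zero =>
    intro a spf ha han hk h
    have : a = n := by omega
    subst this
    rw [PySem.List.pyRange_one_eq_nil (by omega)]
    exact h
  | succ k ih =>
    intro a spf ha han hk h
    have hlt : a < n := by omega
    rw [PySem.List.pyRange_one_cons hlt, List.foldl_cons]
    exact ih (a + 1) _ (by omega) (by omega) (by omega)
      (by simpa using step_good n a ha hlt spf h)

theorem initial_good (n : Int) : GoodSpf n 1 (PySem.List.pyRange 0 n 1) := by
  constructor
  · rw [PySem.List.length_pyRange_one]; omega
  · intro m hmn
    have hm : m < (PySem.List.pyRange 0 n 1).length := by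
      rw [PySem.List.length_pyRange_one]; omega
    rw [PySem.List.pyGetD_natCast, List.getD_eq_getElem?_getD, List.getElem?_eq_getElem hm,
      PySem.List.getElem_pyRange_one 0 n m hm]
    unfold specAt
    rw [if_neg (by
      rintro ⟨h1, h2, -⟩
      have := (Nat.minFac_prime (by omega : m ≠ 1)).two_le
      omega)]
    simp

theorem sieve_getD (n : Int) (m : Nat) (hm : 2 ≤ m) (hmn : (m : Int) < n) :
    PySem.List.pyGetD (sieve n) (m : Int) 0 = (m.minFac : Int) := by
  have hn : 2 ≤ n := by omega
  have hgood : GoodSpf n (n - 1) (sieve n) := by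
    unfold sieve
    exact outer_good n (n - 2).toNat 2 _ (by omega) hn rfl
      (by simpa using initial_good n)
  obtain ⟨-, hval⟩ := hgood
  rw [hval m (by omega)]
  unfold specAt
  have hple : m.minFac ≤ m := Nat.minFac_le (by omega)
  by_cases hpp : m.minFac * m.minFac ≤ m
  · rw [if_pos ⟨hm, by omega, hpp⟩]
  · rw [if_neg (by rintro ⟨-, -, h3⟩; exact hpp h3)]
    have hprime : m.Prime := by
      by_contra hnp
      have := Nat.minFac_sq_le_self (n := m) (by omega) hnp
      rw [pow_two] at this
      exact hpp this
    rw [(Nat.prime_def_minFac.mp hprime).2]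

theorem gpf_eq (n : Int) (spf : List Int)
    (hspf : ∀ m : Nat, 2 ≤ m → (m : Int) < n → PySem.List.pyGetD spf (m : Int) 0 = (m.minFac : Int)) :
    ∀ (fuel : Nat) (x : Int), x < n → x.toNat < fuel →
    gpf spf fuel x = mapInt (Nat.primeFactorsList x.toNat) := by
  intro fuel
  induction fuel with
  | zero => intro x _ h; omega
  | succ fuel ih =>
    intro x hxn hfuel
    rw [gpf]
    by_cases hx1 : 1 < x
    · rw [if_pos hx1]
      set k := x.toNat with hk
      have hk2 : 2 ≤ k := by omega
      have hxk : x = (k : Int) := by omega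
      have hget : PySem.List.pyGetD spf x 0 = (k.minFac : Int) := by
        rw [hxk]; exact hspf k hk2 (by omega)
      have hmf2 : 2 ≤ k.minFac := (Nat.minFac_prime (by omega)).two_le
      have hmfle : k.minFac ≤ k := Nat.minFac_le (by omega)
      have hfd : PySem.Int.floordiv x (PySem.List.pyGetD spf x 0) = ((k / k.minFac : Nat) : Int) := by
        rw [hget, PySem.Int.floordiv, Int.fdiv_eq_ediv,
          if_pos (Or.inl (by omega : (0:Int) ≤ (k.minFac : Int))), sub_zero, hxk]
        exact_mod_cast rfl
      have hqlt : k / k.minFac < k := Nat.div_lt_self (by omega) (by omega)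
      rw [hget] at hfd ⊢
      rw [hfd, ih ((k / k.minFac : Nat) : Int) (by omega) (by simp; omega)]
      rw [Int.toNat_natCast, pfl_two hk2, mapInt_cons]
    · rw [if_neg hx1]
      have : x.toNat = 0 ∨ x.toNat = 1 := by omega
      rcases this with h | h <;> rw [h]
      · rw [Nat.primeFactorsList_zero, mapInt_nil]
      · rw [Nat.primeFactorsList_one, mapInt_nil]

theorem primeFactorsB_eq (x : Int) :
    primeFactorsB x = mapInt (Nat.primeFactorsList x.toNat) := by
  rw [primeFactorsB]
  by_cases hx : 1 ≤ x
  · exact trialDivide_eq _ 2 x (by omega) hx (fun e he hed => by omega) (by omega)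
  · rw [trialDivide, if_neg (by omega : ¬ (2 * 2 : Int) ≤ x), if_neg (by omega : ¬ (1:Int) < x)]
    have : x.toNat = 0 := by omega
    rw [this, Nat.primeFactorsList_zero, mapInt_nil]

theorem factors_agree (mx x : Int) (hx : x ≤ mx) :
    gpf (sieve (mx + 1)) (x.toNat + 1) x = primeFactorsB x := by
  rw [gpf_eq (mx + 1) (sieve (mx + 1)) (fun m hm hmn => sieve_getD (mx + 1) m hm hmn)
      (x.toNat + 1) x (by omega) (by omega),
    primeFactorsB_eq]

-- ===== VERDICT (by name: the statement is the Claim_ definition above) =====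
theorem gcdSort_spec : Claim_equal_gcdSort := by
  intro nums _ hpre
  unfold Spec_gcdSort
  obtain ⟨mx, hmx⟩ : ∃ mx, PySem.List.max? nums (fun y => y) = some mx := by
    cases h : PySem.List.max? nums (fun y => y) with
    | none => exact absurd ((PySem.List.max?_eq_none_iff nums (fun y => y)).mp h) hpre
    | some m => exact ⟨m, rfl⟩
  have hmax := PySem.List.max?_isMax hmx
  simp only [gcdSort, gcdSort_alt, hmx]
  have : nums.foldl
      (fun uf x => (gpf (sieve (mx + 1)) (x.toNat + 1) x).foldl (fun uf f => ufUnion uf x f) uf)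
      (PySem.Dict.mk [])
      = nums.foldl
      (fun uf x => (primeFactorsB x).foldl (fun uf f => ufUnion uf x f) uf)
      (PySem.Dict.mk []) := by
    refine PySem.List.foldl_congr_mem _ _ _ _ (fun acc x hx => ?_)
    rw [factors_agree mx x (hmax x hx)]
  rw [this]
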